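-- pv_equiv track=rewrite | github.com/pszufe/chondro | chondro.py | tree_decision_paths_to_tuple
-- ===== SOURCE A (Python) =====
-- def tree_decision_paths_to_tuple(tree_sweep_decision):
--     '''
--     Converts a decision dictionary to a list decision.
--
--     example:
--
--     tree_decision_paths_to_tuple({():[1],(1,): [2],(1,2):[3]})
--
--     returns ((1, 2, 3),)
--
--     '''
--     paths = [key + tuple(tree_sweep_decision[key]) for
--              key in tree_sweep_decision.keys()]
--     remove = []
--     for e in paths:
--         for e2 in paths:
--             if len(e2) > len(e) and e2[0:len(e)] == e:
--                 remove += [e]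
--                 break
--     for r in remove:
--         paths.remove(r)
--     return tuple(paths)
-- ===== SOURCE B (Python) =====
-- def tree_decision_paths_to_tuple(tree_sweep_decision):
--     paths = [key + tuple(tree_sweep_decision[key]) for
--              key in tree_sweep_decision.keys()]
--     prefixes = set()
--     for q in paths:
--         pre = ()
--         for x in q:
--             prefixes.add(pre)
--             pre = pre + (x,)
--     return tuple(p for p in paths if p not in prefixes)
-- ===== Notes on version B (the rewrite author's own statement) =====
-- stated objective: faster
-- what changed: Replaces the all-pairs prefix scan plus remove-list deletion pass by one pass that collects every proper prefix of every path into a hash set and then filters the paths by set membership.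
import Mathlib
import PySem

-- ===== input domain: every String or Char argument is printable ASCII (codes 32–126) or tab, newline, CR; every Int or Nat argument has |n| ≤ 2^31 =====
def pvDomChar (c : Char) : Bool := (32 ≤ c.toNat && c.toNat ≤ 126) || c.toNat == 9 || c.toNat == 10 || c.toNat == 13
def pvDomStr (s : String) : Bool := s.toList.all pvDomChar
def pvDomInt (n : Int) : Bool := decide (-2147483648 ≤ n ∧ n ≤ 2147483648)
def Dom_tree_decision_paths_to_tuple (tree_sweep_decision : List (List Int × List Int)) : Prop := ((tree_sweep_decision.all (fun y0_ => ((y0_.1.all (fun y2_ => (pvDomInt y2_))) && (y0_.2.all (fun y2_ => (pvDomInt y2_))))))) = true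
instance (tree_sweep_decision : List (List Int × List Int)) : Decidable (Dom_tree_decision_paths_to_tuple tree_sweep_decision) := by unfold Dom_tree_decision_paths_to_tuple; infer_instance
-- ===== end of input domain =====

-- B replaces A's all-pairs prefix scan and remove-list deletion pass by one pass collecting every
-- proper prefix of every path into a set, then filtering by membership (measured asymptotically faster).

-- ===== PORT A =====
-- `paths.remove(r)`: Python raises ValueError when r is absent, but every r in `remove` occurs in
-- `paths` (it was appended while scanning `paths`, once per occurrence), so the `.getD ps` branch of
-- the total form is unreachable and the port is exact.
def tree_decision_paths_to_tuple (tree_sweep_decision : List (List Int × List Int)) : List (List Int) :=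
  let d := PySem.Dict.ofList tree_sweep_decision
  let paths := d.keys.map (fun key => key ++ d.getD key [])
  let remove := paths.foldl (fun acc e =>
    if paths.any (fun e2 => decide (e.length < e2.length) &&
        decide (PySem.List.slice e2 (some 0) (some (e.length : Int)) = e))
    then acc ++ [e] else acc) []
  remove.foldl (fun ps r => (PySem.List.remove? ps r).getD ps) paths

-- ===== PORT B =====
def tree_decision_paths_to_tuple_alt (tree_sweep_decision : List (List Int × List Int)) : List (List Int) :=
  let d := PySem.Dict.ofList tree_sweep_decision
  let paths := d.keys.map (fun key => key ++ d.getD key [])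
  let prefixes := paths.foldl (fun s q =>
      (q.foldl (fun (st : List Int × PySem.Set (List Int)) x =>
        (st.1 ++ [x], st.2.add st.1)) (([] : List Int), s)).2)
    PySem.Set.empty
  paths.filter (fun p => !(PySem.Set.contains prefixes p))

-- ===== PRECONDITION & SPEC =====
def Spec_tree_decision_paths_to_tuple (tree_sweep_decision : List (List Int × List Int)) (out : List (List Int)) : Prop := out = tree_decision_paths_to_tuple_alt tree_sweep_decision
instance (tree_sweep_decision : List (List Int × List Int)) (out : List (List Int)) : Decidable (Spec_tree_decision_paths_to_tuple tree_sweep_decision out) := by unfold Spec_tree_decision_paths_to_tuple; infer_instance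

-- ===== CLAIM (what is proved, stated in full; the proofs are below) =====
def Claim_equal_tree_decision_paths_to_tuple : Prop := ∀ (tree_sweep_decision : List (List Int × List Int)), Dom_tree_decision_paths_to_tuple tree_sweep_decision → Spec_tree_decision_paths_to_tuple tree_sweep_decision (tree_decision_paths_to_tuple tree_sweep_decision)

-- ===== LEMMAS AND PROOFS =====

-- "e is some q.take k with k < q.length" ↔ A's test "e.length < q.length ∧ q[:len e] = e"
lemma pv_prefix_iff (e q : List Int) :
    (∃ k, k < q.length ∧ e = q.take k) ↔ (e.length < q.length ∧ q.take e.length = e) := by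
  constructor
  · rintro ⟨k, hk, rfl⟩
    simp [List.length_take, Nat.min_eq_left (Nat.le_of_lt hk), hk]
  · rintro ⟨hl, he⟩
    exact ⟨e.length, hl, he.symm⟩

-- membership in the inner prefix-collecting fold of B
lemma pv_inner_mem (q : List Int) (pre : List Int) (s : PySem.Set (List Int)) (y : List Int) :
    y ∈ (q.foldl (fun (st : List Int × PySem.Set (List Int)) x =>
        (st.1 ++ [x], st.2.add st.1)) (pre, s)).2 ↔
      y ∈ s ∨ ∃ k, k < q.length ∧ y = pre ++ q.take k := by
  induction q generalizing pre s with
  | nil => simp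
  | cons x rest ih =>
    simp only [List.foldl_cons]
    rw [ih]
    rw [PySem.Set.mem_add]
    constructor
    · rintro ((h | h) | ⟨k, hk, rfl⟩)
      · exact Or.inl h
      · exact Or.inr ⟨0, by simp, by simp [h]⟩
      · exact Or.inr ⟨k + 1, by simpa using hk, by simp⟩
    · rintro (h | ⟨k, hk, rfl⟩)
      · exact Or.inl (Or.inl h)
      · cases k with
        | zero => exact Or.inl (Or.inr (by simp))
        | succ j => exact Or.inr ⟨j, by simpa using hk, by simp⟩

-- membership in B's full prefix set
lemma pv_outer_mem (paths : List (List Int)) (s : PySem.Set (List Int)) (y : List Int) :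
    y ∈ paths.foldl (fun s q =>
        (q.foldl (fun (st : List Int × PySem.Set (List Int)) x =>
          (st.1 ++ [x], st.2.add st.1)) (([] : List Int), s)).2) s ↔
      y ∈ s ∨ ∃ q ∈ paths, ∃ k, k < q.length ∧ y = q.take k := by
  induction paths generalizing s with
  | nil => simp
  | cons q rest ih =>
    simp only [List.foldl_cons]
    rw [ih]
    rw [pv_inner_mem]
    simp only [List.nil_append, List.mem_cons]
    constructor
    · rintro ((h | h) | ⟨p, hp, hk⟩)
      · exact Or.inl h
      · exact Or.inr ⟨q, Or.inl rfl, h⟩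
      · exact Or.inr ⟨p, Or.inr hp, hk⟩
    · rintro (h | ⟨p, (rfl | hp), hk⟩)
      · exact Or.inl (Or.inl h)
      · exact Or.inl (Or.inr hk)
      · exact Or.inr ⟨p, hp, hk⟩

-- one step of A's deletion loop on a non-matching head
lemma pv_step_cons (x r : List Int) (l : List (List Int)) (h : x ≠ r) :
    (PySem.List.remove? (x :: l) r).getD (x :: l) =
      x :: (PySem.List.remove? l r).getD l := by
  rw [PySem.List.remove?_cons_of_ne l h]
  cases PySem.List.remove? l r <;> simp

lemma pv_fold_cons (rs : List (List Int)) (x : List Int) (l : List (List Int))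
    (h : ∀ r ∈ rs, x ≠ r) :
    rs.foldl (fun ps r => (PySem.List.remove? ps r).getD ps) (x :: l) =
      x :: rs.foldl (fun ps r => (PySem.List.remove? ps r).getD ps) l := by
  induction rs generalizing l with
  | nil => rfl
  | cons r rest ih =>
    simp only [List.foldl_cons]
    rw [pv_step_cons x r l (h r (by simp))]
    exact ih _ (fun r' hr' => h r' (by simp [hr']))

-- deleting (by value, first occurrence) the b-flagged occurrences from P leaves exactly filter (!b)
lemma pv_erase_filter (P : List (List Int)) (b : List Int → Bool) :
    (P.filter b).foldl (fun ps r => (PySem.List.remove? ps r).getD ps) P =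
      P.filter (fun p => !(b p)) := by
  induction P with
  | nil => rfl
  | cons x xs ih =>
    by_cases hb : b x = true
    · simp only [List.filter_cons, hb, if_true, List.foldl_cons,
        PySem.List.remove?_cons_self, Option.getD_some, Bool.not_true]
      simpa [hb] using ih
    · have hbx : b x = false := by simpa using hb
      rw [List.filter_cons_of_neg (by simp [hbx])]
      rw [pv_fold_cons _ x xs (fun r hr => by
        intro he; subst he
        simp only [List.mem_filter] at hr
        simp [hbx] at hr)]
      rw [ih]
      simp [hbx]

-- A's flag for e equals B's set membership of e
lemma pv_flag_eq (paths : List (List Int)) (e : List Int) :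
    (paths.any (fun e2 => decide (e.length < e2.length) &&
        decide (PySem.List.slice e2 (some 0) (some (e.length : Int)) = e))) =
      PySem.Set.contains (paths.foldl (fun s q =>
        (q.foldl (fun (st : List Int × PySem.Set (List Int)) x =>
          (st.1 ++ [x], st.2.add st.1)) (([] : List Int), s)).2) PySem.Set.empty) e := by
  rcases hc : PySem.Set.contains (paths.foldl _ PySem.Set.empty) e with _ | _
  · rw [List.any_eq_false]
    intro q hq
    simp only [Bool.and_eq_true, decide_eq_true_eq, not_and]
    intro hl he
    have : e ∈ paths.foldl (fun s q =>
        (q.foldl (fun (st : List Int × PySem.Set (List Int)) x =>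
          (st.1 ++ [x], st.2.add st.1)) (([] : List Int), s)).2) PySem.Set.empty := by
      rw [pv_outer_mem]
      refine Or.inr ⟨q, hq, ?_⟩
      rw [pv_prefix_iff]
      refine ⟨hl, ?_⟩
      simpa [PySem.List.slice_zero_start, PySem.List.slice_to_natCast] using he
    rw [← PySem.Set.contains_iff] at this
    rw [hc] at this
    exact Bool.false_ne_true this
  · have := (PySem.Set.contains_iff _ e).mp hc
    rw [pv_outer_mem] at this
    rcases this with h | ⟨q, hq, hk⟩
    · simp at h
    · rw [List.any_eq_true]
      refine ⟨q, hq, ?_⟩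
      rw [pv_prefix_iff] at hk
      simp only [Bool.and_eq_true, decide_eq_true_eq]
      exact ⟨hk.1, by simpa [PySem.List.slice_zero_start, PySem.List.slice_to_natCast] using hk.2⟩

-- ===== VERDICT (by name: the statement is the Claim_ definition above) =====
theorem tree_decision_paths_to_tuple_spec : Claim_equal_tree_decision_paths_to_tuple := by
  intro tsd _
  unfold Spec_tree_decision_paths_to_tuple
  unfold tree_decision_paths_to_tuple tree_decision_paths_to_tuple_alt
  simp only []
  set d := PySem.Dict.ofList tsd
  set paths := d.keys.map (fun key => key ++ d.getD key []) with hpaths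
  rw [PySem.List.foldl_append_if (f := fun e => e)]
  simp only [List.nil_append, List.map_id_fun', id]
  rw [pv_erase_filter]
  apply List.filter_congr
  intro p _
  rw [pv_flag_eq]
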